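-- pv_equiv track=rewrite | github.com/datamade/openness-project-nmid | camp_fin/management/commands/import_transactions.py | get_month_range
-- ===== SOURCE A (Python) =====
-- def get_month_range(quarters):
--     quarter_to_month_range = {
--         1: (1, 3),
--         2: (4, 6),
--         3: (7, 9),
--         4: (10, 12),
--     }
--
--     months = []
--
--     for q in quarters:
--         months.extend(quarter_to_month_range[q])
--
--     return min(months), max(months)
-- ===== SOURCE B (Python) =====
-- def get_month_range(quarters):
--     quarter_to_month_range = {
--         1: (1, 3),
--         2: (4, 6),
--         3: (7, 9),
--         4: (10, 12),
--     }
--     return (quarter_to_month_range[min(quarters)][0],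
--             quarter_to_month_range[max(quarters)][1])
-- ===== Notes on version B (the rewrite author's own statement) =====
-- stated objective: simpler
-- what changed: B skips building the flattened months list entirely: it takes min and max of the quarters themselves and reads the low month of the smallest quarter and the high month of the largest quarter straight from the mapping (monotonicity of the quarter-to-month ranges).
import Mathlib
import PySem

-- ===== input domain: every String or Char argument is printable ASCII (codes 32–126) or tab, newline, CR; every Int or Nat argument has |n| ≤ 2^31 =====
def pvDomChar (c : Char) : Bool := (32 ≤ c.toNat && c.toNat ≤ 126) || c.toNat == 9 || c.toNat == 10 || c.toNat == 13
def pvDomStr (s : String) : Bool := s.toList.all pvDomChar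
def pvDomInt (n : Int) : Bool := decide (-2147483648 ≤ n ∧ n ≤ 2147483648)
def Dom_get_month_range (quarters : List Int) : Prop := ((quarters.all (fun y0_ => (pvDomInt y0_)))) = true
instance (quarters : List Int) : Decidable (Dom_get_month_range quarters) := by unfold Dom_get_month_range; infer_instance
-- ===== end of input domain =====

-- B avoids building the per-quarter months list: min/max over quarters plus one dict read each.
-- Equivalence of RETURN values on nonempty lists of valid quarters (Pre_).

-- ===== PORT A =====
-- the module-level quarter_to_month_range dict, shared by both ports
def quarterToMonthRange : PySem.Dict Int (Int × Int) :=
  PySem.Dict.ofList [(1, (1, 3)), (2, (4, 6)), (3, (7, 9)), (4, (10, 12))]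

-- one loop step: the two months quarter_to_month_range[q] contributes
-- (a missing key raises KeyError in Python; excluded by Pre_, contributes [] here)
def qMonths (q : Int) : List Int :=
  match quarterToMonthRange.get? q with
  | some (a, b) => [a, b]
  | none => []

def get_month_range (quarters : List Int) : Int × Int :=
  -- months = []; for q in quarters: months.extend(quarter_to_month_range[q])
  let months : List Int := quarters.foldl (fun acc q => acc ++ qMonths q) []
  -- min(months), max(months)  (empty months raises ValueError in Python; excluded by Pre_)
  ((PySem.List.min? months (fun x => x)).getD 0,
   (PySem.List.max? months (fun x => x)).getD 0)

-- ===== PORT B =====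
def get_month_range_alt (quarters : List Int) : Int × Int :=
  let qmin := (PySem.List.min? quarters (fun x => x)).getD 0
  let qmax := (PySem.List.max? quarters (fun x => x)).getD 0
  (((quarterToMonthRange.get? qmin).getD (0, 0)).1,
   ((quarterToMonthRange.get? qmax).getD (0, 0)).2)

-- ===== PRECONDITION & SPEC =====
-- Pre_ excludes exactly the inputs where the Python A raises: an empty list (ValueError
-- from min([])) and any quarter outside 1..4 (KeyError from the dict lookup).
def Pre_get_month_range (quarters : List Int) : Prop :=
  quarters ≠ [] ∧ ∀ q ∈ quarters, 1 ≤ q ∧ q ≤ 4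
instance (quarters : List Int) : Decidable (Pre_get_month_range quarters) := by
  unfold Pre_get_month_range; infer_instance

def pvWitness_get_month_range : List Int := [2, 4, 1]

def Spec_get_month_range (quarters : List Int) (out : Int × Int) : Prop := out = get_month_range_alt quarters
instance (quarters : List Int) (out : Int × Int) : Decidable (Spec_get_month_range quarters out) := by unfold Spec_get_month_range; infer_instance

-- ===== CLAIM (what is proved, stated in full; the proofs are below) =====
def Claim_equal_get_month_range : Prop := ∀ (quarters : List Int), Dom_get_month_range quarters → Pre_get_month_range quarters → Spec_get_month_range quarters (get_month_range quarters)

-- ===== LEMMAS AND PROOFS =====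

theorem qMonths_valid {q : Int} (h1 : 1 ≤ q) (h4 : q ≤ 4) :
    qMonths q = [3 * q - 2, 3 * q] := by
  interval_cases q <;> rfl

theorem lookup_valid {q : Int} (h1 : 1 ≤ q) (h4 : q ≤ 4) :
    quarterToMonthRange.get? q = some (3 * q - 2, 3 * q) := by
  interval_cases q <;> rfl

theorem foldl_min_range {t : List Int} : ∀ q : Int, (∀ x ∈ t, 1 ≤ x ∧ x ≤ 4) →
    1 ≤ q → q ≤ 4 → 1 ≤ t.foldl min q ∧ t.foldl min q ≤ 4 := by
  induction t with
  | nil => intro q _ h1 h4; exact ⟨h1, h4⟩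
  | cons r t ih =>
    intro q hall h1 h4
    have hr := hall r (by simp)
    exact ih (min q r) (fun x hx => hall x (by simp [hx])) (by omega) (by omega)

theorem foldl_max_range {t : List Int} : ∀ q : Int, (∀ x ∈ t, 1 ≤ x ∧ x ≤ 4) →
    1 ≤ q → q ≤ 4 → 1 ≤ t.foldl max q ∧ t.foldl max q ≤ 4 := by
  induction t with
  | nil => intro q _ h1 h4; exact ⟨h1, h4⟩
  | cons r t ih =>
    intro q hall h1 h4
    have hr := hall r (by simp)
    exact ih (max q r) (fun x hx => hall x (by simp [hx])) (by omega) (by omega)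

theorem flatMap_min {t : List Int} : ∀ a : Int, (∀ x ∈ t, 1 ≤ x ∧ x ≤ 4) →
    (t.flatMap qMonths).foldl min (3 * a - 2) = 3 * t.foldl min a - 2 := by
  induction t with
  | nil => intro a _; rfl
  | cons r t ih =>
    intro a hall
    have hr := hall r (by simp)
    have h := qMonths_valid hr.1 hr.2
    have hacc : min (min (3 * a - 2) (3 * r - 2)) (3 * r) = 3 * min a r - 2 := by omega
    simp only [List.flatMap_cons, h, List.foldl_append, List.foldl_cons, List.foldl_nil, hacc]
    exact ih (min a r) (fun x hx => hall x (by simp [hx]))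

theorem flatMap_max {t : List Int} : ∀ a : Int, (∀ x ∈ t, 1 ≤ x ∧ x ≤ 4) →
    (t.flatMap qMonths).foldl max (3 * a) = 3 * t.foldl max a := by
  induction t with
  | nil => intro a _; rfl
  | cons r t ih =>
    intro a hall
    have hr := hall r (by simp)
    have h := qMonths_valid hr.1 hr.2
    have hacc : max (max (3 * a) (3 * r - 2)) (3 * r) = 3 * max a r := by omega
    simp only [List.flatMap_cons, h, List.foldl_append, List.foldl_cons, List.foldl_nil, hacc]
    exact ih (max a r) (fun x hx => hall x (by simp [hx]))

-- ===== VERDICT (by name: the statement is the Claim_ definition above) =====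
theorem get_month_range_spec : Claim_equal_get_month_range := by
  intro quarters _ hpre
  obtain ⟨hne, hall⟩ := hpre
  unfold Spec_get_month_range get_month_range get_month_range_alt
  obtain ⟨q, t, rfl⟩ := List.exists_cons_of_ne_nil hne
  have hq := hall q (by simp)
  have halt : ∀ x ∈ t, 1 ≤ x ∧ x ≤ 4 := fun x hx => hall x (by simp [hx])
  have hmonths : (q :: t).foldl (fun acc r => acc ++ qMonths r) []
      = (3 * q - 2) :: (3 * q) :: t.flatMap qMonths := by
    rw [PySem.List.foldl_append_eq_flatMap, List.flatMap_cons, qMonths_valid hq.1 hq.2]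
    rfl
  simp only [hmonths]
  rw [PySem.List.min?_id_cons, PySem.List.max?_id_cons, PySem.List.min?_id_cons,
    PySem.List.max?_id_cons]
  simp only [List.foldl_cons, Option.getD_some]
  have hminq := foldl_min_range q halt hq.1 hq.2
  have hmaxq := foldl_max_range q halt hq.1 hq.2
  rw [lookup_valid hminq.1 hminq.2, lookup_valid hmaxq.1 hmaxq.2]
  have h1 : min (3 * q - 2) (3 * q) = 3 * q - 2 := by omega
  have h2 : max (3 * q - 2) (3 * q) = 3 * q := by omega
  rw [h1, h2, flatMap_min q halt, flatMap_max q halt]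
  simp
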